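-- pv_equiv track=rewrite | github.com/HumanCellAtlas/data-monitoring-dashboard | tracker/common/dynamo_agents/ingest_dynamo_agent.py | _aggregrate_analysis_envelopes_stats
-- ===== SOURCE A (Python) =====
-- from collections import Counter
--
-- def _aggregrate_analysis_envelopes_stats(latest_primary_bundles, analysis_envelopes_map):
--     latest_analysis_envelope_update_date = ''
--     envelope_statuses_count = Counter()
--     envelope_statuses_count['Total'] = 0
--     for uuid, bundle in latest_primary_bundles.items():
--         envelopes = analysis_envelopes_map.get(uuid, [])
--         for envelope in envelopes:
--             if envelope['update_date'] > latest_analysis_envelope_update_date: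
--                 latest_analysis_envelope_update_date = envelope['update_date']
--             status = envelope['submission_status']
--             envelope_statuses_count[status] += 1
--             envelope_statuses_count['Total'] += 1
--     if latest_analysis_envelope_update_date == '':
--         latest_analysis_envelope_update_date = 'N/A'
--     return envelope_statuses_count, latest_analysis_envelope_update_date
-- ===== SOURCE B (Python) =====
-- from collections import Counter
--
-- def _aggregrate_analysis_envelopes_stats(latest_primary_bundles, analysis_envelopes_map):
--     all_envelopes = []
--     for uuid in latest_primary_bundles:
--         all_envelopes.extend(analysis_envelopes_map.get(uuid, []))
--     statuses = Counter()
--     statuses['Total'] = 0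
--     statuses.update(e['submission_status'] for e in all_envelopes)
--     statuses['Total'] += len(all_envelopes)
--     latest = max((e['update_date'] for e in all_envelopes), default='') or 'N/A'
--     return statuses, latest
-- ===== Notes on version B (the rewrite author's own statement) =====
-- stated objective: simpler
-- what changed: A threads a (Counter, latest-date) pair through an interleaved nested loop with two increments per envelope; B first flattens the envelopes reachable from latest_primary_bundles into one list, then computes the status counts with a single Counter.update, adds len() to 'Total' once, and takes the latest date with max(..., default='') or 'N/A'.
import Mathlib
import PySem

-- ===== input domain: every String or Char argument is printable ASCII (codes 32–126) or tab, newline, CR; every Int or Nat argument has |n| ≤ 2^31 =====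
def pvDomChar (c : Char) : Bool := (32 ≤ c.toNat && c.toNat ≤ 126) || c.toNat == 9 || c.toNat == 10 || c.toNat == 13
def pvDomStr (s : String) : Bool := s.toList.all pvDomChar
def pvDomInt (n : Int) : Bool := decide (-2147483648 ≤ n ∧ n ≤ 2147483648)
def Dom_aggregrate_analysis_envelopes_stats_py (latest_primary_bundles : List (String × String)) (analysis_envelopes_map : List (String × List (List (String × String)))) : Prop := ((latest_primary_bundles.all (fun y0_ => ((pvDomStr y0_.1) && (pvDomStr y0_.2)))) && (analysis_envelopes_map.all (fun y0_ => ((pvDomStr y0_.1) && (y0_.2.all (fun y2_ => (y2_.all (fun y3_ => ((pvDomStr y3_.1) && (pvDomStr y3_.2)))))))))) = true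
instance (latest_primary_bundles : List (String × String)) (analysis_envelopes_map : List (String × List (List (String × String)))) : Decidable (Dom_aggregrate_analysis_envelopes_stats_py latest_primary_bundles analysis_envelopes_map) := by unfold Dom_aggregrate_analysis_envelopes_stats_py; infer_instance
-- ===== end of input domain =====

-- B replaces A's interleaved nested loop/state with: flatten the relevant envelopes once, then one Counter
-- pass for the statuses, one arithmetic bump for 'Total', and one max for the date (objective: simpler decomposition).

-- ===== PORT A =====
def aggregrate_analysis_envelopes_stats_py (latest_primary_bundles : List (String × String)) (analysis_envelopes_map : List (String × List (List (String × String)))) : (List (String × Int)) × String :=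
  -- state = (envelope_statuses_count, latest_analysis_envelope_update_date)
  let st := latest_primary_bundles.foldl
    (fun (st : PySem.Dict String Int × String) uuid_bundle =>
      let envelopes := (PySem.Dict.mk analysis_envelopes_map).getD uuid_bundle.1 []
      envelopes.foldl
        (fun st envelope =>
          -- envelope['update_date'] / envelope['submission_status']: a missing key is a KeyError,
          -- excluded by Pre_; the "" default is never used on admitted inputs
          let ud := (PySem.Dict.mk envelope).getD "update_date" ""
          let latest := if ud > st.2 then ud else st.2
          let status := (PySem.Dict.mk envelope).getD "submission_status" ""
          ((st.1.modify status 0 (· + 1)).modify "Total" 0 (· + 1), latest))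
        st)
    (((PySem.Dict.empty : PySem.Dict String Int).insert "Total" 0), "")
  (st.1.items, if st.2 == "" then "N/A" else st.2)

-- ===== PORT B =====
def aggregrate_analysis_envelopes_stats_py_alt (latest_primary_bundles : List (String × String)) (analysis_envelopes_map : List (String × List (List (String × String)))) : (List (String × Int)) × String :=
  let all_envelopes := latest_primary_bundles.foldl
    (fun acc p => acc ++ (PySem.Dict.mk analysis_envelopes_map).getD p.1 [])
    ([] : List (List (String × String)))
  let statuses := ((PySem.Dict.empty : PySem.Dict String Int).insert "Total" 0)
  -- statuses.update(e['submission_status'] for e in all_envelopes)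
  let statuses := (all_envelopes.map (fun e => (PySem.Dict.mk e).getD "submission_status" "")).foldl
    (fun d s => d.modify s 0 (· + 1)) statuses
  -- statuses['Total'] += len(all_envelopes)
  let statuses := statuses.modify "Total" 0 (· + (all_envelopes.length : Int))
  -- max(..., default='') or 'N/A'
  let latest := (all_envelopes.map (fun e => (PySem.Dict.mk e).getD "update_date" "")).foldl
    (fun m u => if m < u then u else m) ""
  (statuses.items, if latest == "" then "N/A" else latest)

-- ===== PRECONDITION & SPEC =====
-- Pre_ excludes (a) envelopes reachable through latest_primary_bundles that lack the 'update_date' or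
-- 'submission_status' key, on which A raises KeyError, and (b) association lists with duplicate keys,
-- which do not represent a Python dict (a dict cannot hold duplicate keys).
def Pre_aggregrate_analysis_envelopes_stats_py (latest_primary_bundles : List (String × String)) (analysis_envelopes_map : List (String × List (List (String × String)))) : Prop :=
  (latest_primary_bundles.map Prod.fst).Nodup ∧
  (analysis_envelopes_map.map Prod.fst).Nodup ∧
  (∀ p ∈ analysis_envelopes_map, ∀ env ∈ p.2, (env.map Prod.fst).Nodup) ∧
  (∀ p ∈ analysis_envelopes_map, (∃ q ∈ latest_primary_bundles, q.1 = p.1) →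
    ∀ env ∈ p.2, "update_date" ∈ env.map Prod.fst ∧ "submission_status" ∈ env.map Prod.fst)
instance (latest_primary_bundles : List (String × String)) (analysis_envelopes_map : List (String × List (List (String × String)))) : Decidable (Pre_aggregrate_analysis_envelopes_stats_py latest_primary_bundles analysis_envelopes_map) := by unfold Pre_aggregrate_analysis_envelopes_stats_py; infer_instance

def pvWitness_aggregrate_analysis_envelopes_stats_py : (List (String × String)) × (List (String × List (List (String × String)))) :=
  ([("u1", "b1")], [("u1", [[("update_date", "2020-01-01"), ("submission_status", "Valid")]])])

def Spec_aggregrate_analysis_envelopes_stats_py (latest_primary_bundles : List (String × String)) (analysis_envelopes_map : List (String × List (List (String × String)))) (out : (List (String × Int)) × String) : Prop := out = aggregrate_analysis_envelopes_stats_py_alt latest_primary_bundles analysis_envelopes_map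
instance (latest_primary_bundles : List (String × String)) (analysis_envelopes_map : List (String × List (List (String × String)))) (out : (List (String × Int)) × String) : Decidable (Spec_aggregrate_analysis_envelopes_stats_py latest_primary_bundles analysis_envelopes_map out) := by unfold Spec_aggregrate_analysis_envelopes_stats_py; infer_instance

-- ===== CLAIM (what is proved, stated in full; the proofs are below) =====
def Claim_equal_aggregrate_analysis_envelopes_stats_py : Prop := ∀ (latest_primary_bundles : List (String × String)) (analysis_envelopes_map : List (String × List (List (String × String)))), Dom_aggregrate_analysis_envelopes_stats_py latest_primary_bundles analysis_envelopes_map → Pre_aggregrate_analysis_envelopes_stats_py latest_primary_bundles analysis_envelopes_map → Spec_aggregrate_analysis_envelopes_stats_py latest_primary_bundles analysis_envelopes_map (aggregrate_analysis_envelopes_stats_py latest_primary_bundles analysis_envelopes_map)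

-- ===== LEMMAS AND PROOFS =====

-- a fold whose step updates the two components of a pair independently splits into two folds
theorem pv_foldl_prod_split {α β γ : Type} (l : List α) (f : β → α → β) (g : γ → α → γ) (b : β) (c : γ) :
    l.foldl (fun st e => (f st.1 e, g st.2 e)) (b, c) = (l.foldl f b, l.foldl g c) := by
  induction l generalizing b c with
  | nil => rfl
  | cons e l ih => simp [List.foldl_cons, ih]

-- keys of an insert, as a Set.add
theorem pv_keys_insert (d : PySem.Dict String Int) (k : String) (v : Int) :
    (d.insert k v).keys = PySem.Set.add d.keys k := by
  by_cases h : d.contains k = true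
  · rw [PySem.Dict.keys_insert_of_contains d v h,
      PySem.Set.add_of_mem ((PySem.Dict.contains_iff_mem_keys d k).1 h)]
  · have h' : d.contains k = false := by simpa using h
    rw [PySem.Dict.keys_insert_of_not_contains d v h', PySem.Set.add_of_not_mem]
    intro hm; exact h ((PySem.Dict.contains_iff_mem_keys d k).2 hm)

-- keys of A's counting loop: 'Total' stays present, each status is added once
theorem pv_keys_countA (s : List (String × String) → String)
    (es : List (List (String × String))) (d : PySem.Dict String Int) (h : "Total" ∈ d.keys) :
    (es.foldl (fun d e => (d.modify (s e) 0 (· + 1)).modify "Total" 0 (· + 1)) d).keys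
      = es.foldl (fun ks e => PySem.Set.add ks (s e)) d.keys := by
  induction es generalizing d with
  | nil => rfl
  | cons e es ih =>
    simp only [List.foldl_cons]
    rw [ih]
    · have htot : "Total" ∈ PySem.Set.add d.keys (s e) := (PySem.Set.mem_add _ _ _).2 (Or.inl h)
      have : ((d.modify (s e) 0 (· + 1)).modify "Total" 0 (· + 1)).keys
          = PySem.Set.add d.keys (s e) := by
        rw [PySem.Dict.keys_modify, pv_keys_insert, PySem.Dict.keys_modify,
          pv_keys_insert, PySem.Set.add_of_mem htot]
      rw [this]
    · rw [PySem.Dict.keys_modify, pv_keys_insert, PySem.Dict.keys_modify,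
        pv_keys_insert]
      exact (PySem.Set.mem_add _ _ _).2 (Or.inl ((PySem.Set.mem_add _ _ _).2 (Or.inl h)))

-- keys of B's plain counting loop
theorem pv_keys_countB (s : List (String × String) → String)
    (es : List (List (String × String))) (d : PySem.Dict String Int) :
    (es.foldl (fun d e => d.modify (s e) 0 (· + 1)) d).keys
      = es.foldl (fun ks e => PySem.Set.add ks (s e)) d.keys := by
  induction es generalizing d with
  | nil => rfl
  | cons e es ih =>
    simp only [List.foldl_cons]
    rw [ih, PySem.Dict.keys_modify, pv_keys_insert]

-- membership is preserved through a Set.add fold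
theorem pv_mem_foldl_add (s : List (String × String) → String)
    (es : List (List (String × String))) (ks : PySem.Set String) (x : String) (h : x ∈ ks) :
    x ∈ es.foldl (fun ks e => PySem.Set.add ks (s e)) ks := by
  induction es generalizing ks with
  | nil => exact h
  | cons e es ih => exact ih _ ((PySem.Set.mem_add _ _ _).2 (Or.inl h))

-- Nodup is preserved through a Set.add fold
theorem pv_nodup_foldl_add (s : List (String × String) → String)
    (es : List (List (String × String))) (ks : PySem.Set String) (h : ks.Nodup) :
    (es.foldl (fun ks e => PySem.Set.add ks (s e)) ks).Nodup := by
  induction es generalizing ks with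
  | nil => exact h
  | cons e es ih => exact ih _ (PySem.Set.nodup_add _ _ h)

-- value of A's counting loop at any key
theorem pv_getD_countA (s : List (String × String) → String)
    (es : List (List (String × String))) (d : PySem.Dict String Int) (v : String) :
    (es.foldl (fun d e => (d.modify (s e) 0 (· + 1)).modify "Total" 0 (· + 1)) d).getD v 0
      = d.getD v 0 + ((es.map s).count v : Int) + (if v = "Total" then (es.length : Int) else 0) := by
  induction es generalizing d with
  | nil => simp
  | cons e es ih =>
    simp only [List.foldl_cons, ih, List.map_cons, List.count_cons, List.length_cons,
      PySem.Dict.getD_modify]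
    split_ifs <;> simp_all <;> omega

-- the two counters agree as Dicts
theorem pv_counter_eq (s : List (String × String) → String) (es : List (List (String × String))) :
    es.foldl (fun d e => (d.modify (s e) 0 (· + 1)).modify "Total" 0 (· + 1))
        ((PySem.Dict.empty : PySem.Dict String Int).insert "Total" 0)
      = (es.foldl (fun d e => d.modify (s e) 0 (· + 1))
          ((PySem.Dict.empty : PySem.Dict String Int).insert "Total" 0)).modify "Total" 0
          (· + (es.length : Int)) := by
  set d0 : PySem.Dict String Int := (PySem.Dict.empty).insert "Total" 0 with hd0
  have hkeys0 : d0.keys = ["Total"] := by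
    rw [hd0]; rfl
  have hTot : "Total" ∈ d0.keys := by rw [hkeys0]; exact List.mem_singleton.2 rfl
  have hkeysA := pv_keys_countA s es d0 hTot
  have hkeysB : ((es.foldl (fun d e => d.modify (s e) 0 (· + 1)) d0).modify "Total" 0
      (· + (es.length : Int))).keys = es.foldl (fun ks e => PySem.Set.add ks (s e)) d0.keys := by
    rw [PySem.Dict.keys_modify, pv_keys_insert, pv_keys_countB,
      PySem.Set.add_of_mem (pv_mem_foldl_add s es d0.keys "Total" hTot)]
  have hnd : (es.foldl (fun ks e => PySem.Set.add ks (s e)) d0.keys).Nodup := by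
    refine pv_nodup_foldl_add s es d0.keys ?_
    rw [hkeys0]; exact List.nodup_singleton _
  have hgd : ∀ v, (es.foldl (fun d e => (d.modify (s e) 0 (· + 1)).modify "Total" 0 (· + 1)) d0).getD v 0
      = ((es.foldl (fun d e => d.modify (s e) 0 (· + 1)) d0).modify "Total" 0
          (· + (es.length : Int))).getD v 0 := by
    intro v
    rw [pv_getD_countA, PySem.Dict.getD_modify]
    have hB : ∀ w, (es.foldl (fun d e => d.modify (s e) 0 (· + 1)) d0).getD w 0
        = d0.getD w 0 + ((es.map s).count w : Int) := by
      intro w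
      have := PySem.Dict.getD_foldl_modify_add_one (es.map s) d0 w
      rw [List.foldl_map] at this
      exact this
    by_cases hT : v = "Total" <;> simp [hT, hB]
  apply PySem.Dict.ext
  rw [PySem.Dict.items_eq_map_keys _ (hkeysA ▸ hnd) 0,
    PySem.Dict.items_eq_map_keys _ (hkeysB ▸ hnd) 0, hkeysA, hkeysB]
  exact List.map_congr_left (fun k _ => by rw [hgd k])

-- ===== VERDICT (by name: the statement is the Claim_ definition above) =====
theorem aggregrate_analysis_envelopes_stats_py_spec : Claim_equal_aggregrate_analysis_envelopes_stats_py := by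
  intro lpb aem _ _
  unfold Spec_aggregrate_analysis_envelopes_stats_py
  unfold aggregrate_analysis_envelopes_stats_py aggregrate_analysis_envelopes_stats_py_alt
  simp only [PySem.List.foldl_append_eq_flatMap, List.nil_append]
  set es := lpb.flatMap (fun p => (PySem.Dict.mk aem).getD p.1 []) with hes
  have hflat : lpb.foldl
      (fun (st : PySem.Dict String Int × String) uuid_bundle =>
        ((PySem.Dict.mk aem).getD uuid_bundle.1 []).foldl
          (fun st envelope =>
            ((st.1.modify ((PySem.Dict.mk envelope).getD "submission_status" "") 0 (· + 1)).modify "Total" 0 (· + 1),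
             if (PySem.Dict.mk envelope).getD "update_date" "" > st.2
               then (PySem.Dict.mk envelope).getD "update_date" "" else st.2))
          st)
      (((PySem.Dict.empty : PySem.Dict String Int).insert "Total" 0), "")
      = es.foldl
          (fun st envelope =>
            ((st.1.modify ((PySem.Dict.mk envelope).getD "submission_status" "") 0 (· + 1)).modify "Total" 0 (· + 1),
             if (PySem.Dict.mk envelope).getD "update_date" "" > st.2
               then (PySem.Dict.mk envelope).getD "update_date" "" else st.2))
          (((PySem.Dict.empty : PySem.Dict String Int).insert "Total" 0), "") := by
    rw [hes, List.foldl_flatMap]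
  rw [hflat]
  have hsplit := pv_foldl_prod_split es
      (fun (d : PySem.Dict String Int) envelope =>
        (d.modify ((PySem.Dict.mk envelope).getD "submission_status" "") 0 (· + 1)).modify "Total" 0 (· + 1))
      (fun (m : String) envelope =>
        if (PySem.Dict.mk envelope).getD "update_date" "" > m
          then (PySem.Dict.mk envelope).getD "update_date" "" else m)
      (((PySem.Dict.empty : PySem.Dict String Int).insert "Total" 0)) ""
  rw [hsplit]
  rw [pv_counter_eq (fun envelope => (PySem.Dict.mk envelope).getD "submission_status" "") es]
  simp only [List.foldl_map]
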